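-- pv_equiv track=rewrite | github.com/rishiu/draftgpt | nanoGPT/draft_infer.py | to_grid
-- ===== SOURCE A (Python) =====
-- from typing import List, Dict, Set, Optional, Tuple
--
-- def to_grid(order_ids: List[int], itos: Dict[int, str], teams: int, rounds: int) -> List[List[str]]:
--     # Build a snake-draft grid (rounds x teams)
--     grid = [["" for _ in range(teams)] for _ in range(rounds)]
--     for pick_idx in range(min(len(order_ids), teams * rounds)):
--         rnd = pick_idx // teams
--         pos_in_round = pick_idx % teams
--         if rnd % 2 == 0:
--             col = pos_in_round
--         else:
--             col = teams - 1 - pos_in_round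
--         name = itos.get(order_ids[pick_idx], f"<id:{order_ids[pick_idx]}>")
--         grid[rnd][col] = name
--     return grid
-- ===== SOURCE B (Python) =====
-- def to_grid(order_ids, itos, teams, rounds):
--     # Round-by-round: resolve names once for the capped picks, then slice each
--     # round's chunk, pad it to full width, and reverse whole odd rows.
--     names = [itos.get(pid, f"<id:{pid}>") for pid in order_ids[:max(0, teams * rounds)]]
--     grid = []
--     for r in range(rounds):
--         chunk = names[r * teams:(r + 1) * teams]
--         row = chunk + [""] * (teams - len(chunk))
--         grid.append(row if r % 2 == 0 else row[::-1])
--     return grid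
-- ===== Notes on version B (the rewrite author's own statement) =====
-- stated objective: simpler
-- what changed: Builds the grid round by round: picks capped to teams*rounds are resolved to names once, each round's chunk is sliced out, padded to full width with empty strings, and odd rows are reversed whole - no per-pick flat-index or column arithmetic remains.
-- outside the precondition, e.g. on to_grid([1, 2], {}, -2, -2): A raises IndexError, B returns []
import Mathlib
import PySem

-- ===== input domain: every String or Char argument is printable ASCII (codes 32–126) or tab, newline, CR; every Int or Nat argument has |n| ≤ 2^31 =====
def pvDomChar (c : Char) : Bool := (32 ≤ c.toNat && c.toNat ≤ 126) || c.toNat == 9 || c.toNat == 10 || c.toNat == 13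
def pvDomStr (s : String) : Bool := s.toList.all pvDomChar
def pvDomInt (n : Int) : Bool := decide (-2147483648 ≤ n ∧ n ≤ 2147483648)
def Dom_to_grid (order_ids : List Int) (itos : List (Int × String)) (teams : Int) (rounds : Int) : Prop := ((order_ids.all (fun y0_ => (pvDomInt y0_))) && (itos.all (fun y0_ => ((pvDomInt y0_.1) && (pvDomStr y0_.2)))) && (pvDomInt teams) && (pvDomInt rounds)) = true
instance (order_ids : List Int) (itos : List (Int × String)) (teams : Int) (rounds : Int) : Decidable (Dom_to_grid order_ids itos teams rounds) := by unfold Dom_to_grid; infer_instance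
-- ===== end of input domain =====

-- B builds the grid round by round (slice, pad, reverse odd rows) instead of A's per-pick flat-index placement (objective: simpler).

-- ===== PORT A =====
-- pyGetD with default is exact here: inside Pre_ every index read by A is in range.
-- pySetD is exact here: inside Pre_ every grid[rnd][col] assignment is in range.
def to_grid (order_ids : List Int) (itos : List (Int × String)) (teams : Int) (rounds : Int) : List (List String) :=
  let grid : List (List String) :=
    (PySem.List.pyRange 0 rounds 1).map (fun _ => (PySem.List.pyRange 0 teams 1).map (fun _ => ""))
  (PySem.List.pyRange 0 (min (order_ids.length : Int) (teams * rounds)) 1).foldl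
    (fun grid pick_idx =>
      let rnd := PySem.Int.floordiv pick_idx teams
      let pos_in_round := PySem.Int.mod pick_idx teams
      let col := if PySem.Int.mod rnd 2 = 0 then pos_in_round else teams - 1 - pos_in_round
      let pid := PySem.List.pyGetD order_ids pick_idx 0
      let name := (PySem.Dict.mk itos).getD pid ("<id:" ++ PySem.Int.toStr pid ++ ">")
      PySem.List.pySetD grid rnd (PySem.List.pySetD (PySem.List.pyGetD grid rnd []) col name))
    grid

-- ===== PORT B =====
-- List.replicate (…).toNat mirrors Python's [""] * k, which is empty for k ≤ 0.
def to_grid_alt (order_ids : List Int) (itos : List (Int × String)) (teams : Int) (rounds : Int) : List (List String) :=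
  let names := (PySem.List.slice order_ids none (some (max 0 (teams * rounds)))).map (fun pid =>
    (PySem.Dict.mk itos).getD pid ("<id:" ++ PySem.Int.toStr pid ++ ">"))
  (PySem.List.pyRange 0 rounds 1).foldl
    (fun grid r =>
      let chunk := PySem.List.slice names (some (r * teams)) (some ((r + 1) * teams))
      let row := chunk ++ List.replicate (teams - (chunk.length : Int)).toNat ""
      grid ++ [if PySem.Int.mod r 2 = 0 then row else row.reverse]) []

-- ===== PRECONDITION & SPEC =====
-- Pre_ excludes exactly the inputs where A raises IndexError: teams and rounds both
-- negative (so teams*rounds > 0, the loop runs) with a non-empty pick list but an empty grid.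
def Pre_to_grid (order_ids : List Int) (itos : List (Int × String)) (teams : Int) (rounds : Int) : Prop :=
  ¬ (teams < 0 ∧ rounds < 0 ∧ order_ids ≠ [])
instance (order_ids : List Int) (itos : List (Int × String)) (teams : Int) (rounds : Int) : Decidable (Pre_to_grid order_ids itos teams rounds) := by unfold Pre_to_grid; infer_instance

def pvWitness_to_grid : List Int × (List (Int × String)) × Int × Int :=
  ([3, 1, 2], [(1, "a"), (2, "b")], 2, 2)

def Spec_to_grid (order_ids : List Int) (itos : List (Int × String)) (teams : Int) (rounds : Int) (out : List (List String)) : Prop := out = to_grid_alt order_ids itos teams rounds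
instance (order_ids : List Int) (itos : List (Int × String)) (teams : Int) (rounds : Int) (out : List (List String)) : Decidable (Spec_to_grid order_ids itos teams rounds out) := by unfold Spec_to_grid; infer_instance

-- ===== CLAIM (what is proved, stated in full; the proofs are below) =====
def Claim_equal_to_grid : Prop := ∀ (order_ids : List Int) (itos : List (Int × String)) (teams : Int) (rounds : Int), Dom_to_grid order_ids itos teams rounds → Pre_to_grid order_ids itos teams rounds → Spec_to_grid order_ids itos teams rounds (to_grid order_ids itos teams rounds)

-- ===== LEMMAS AND PROOFS =====

-- The cell value determined by a flat pick index, with n picks placed in total.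
def pvAt (order_ids : List Int) (itos : List (Int × String)) (n idx : Int) : String :=
  if 0 ≤ idx ∧ idx < n then
    let pid := PySem.List.pyGetD order_ids idx 0
    (PySem.Dict.mk itos).getD pid ("<id:" ++ PySem.Int.toStr pid ++ ">")
  else ""

-- B's per-cell value at round r, column c.
def pvCell (order_ids : List Int) (itos : List (Int × String)) (teams : Int) (n : Int) (r c : Int) : String :=
  let j := if PySem.Int.mod r 2 = 0 then c else teams - 1 - c
  pvAt order_ids itos n (r * teams + j)

-- A's loop body.
def pvStep (order_ids : List Int) (itos : List (Int × String)) (teams : Int)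
    (grid : List (List String)) (pick_idx : Int) : List (List String) :=
  let rnd := PySem.Int.floordiv pick_idx teams
  let pos_in_round := PySem.Int.mod pick_idx teams
  let col := if PySem.Int.mod rnd 2 = 0 then pos_in_round else teams - 1 - pos_in_round
  let pid := PySem.List.pyGetD order_ids pick_idx 0
  let name := (PySem.Dict.mk itos).getD pid ("<id:" ++ PySem.Int.toStr pid ++ ">")
  PySem.List.pySetD grid rnd (PySem.List.pySetD (PySem.List.pyGetD grid rnd []) col name)

lemma pvSet_map_pyRange {α : Type} (f : Int → α) (n i : Int) (v : α) (h0 : 0 ≤ i) (h : i < n) :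
    PySem.List.pySetD ((PySem.List.pyRange 0 n 1).map f) i v
      = (PySem.List.pyRange 0 n 1).map (fun x => if x = i then v else f x) := by
  rw [PySem.List.pySetD_of_nonneg _ _ h0]
  apply List.ext_getElem
  · simp
  · intro m hm1 hm2
    simp only [List.getElem_set, List.getElem_map, PySem.List.getElem_pyRange_one, zero_add]
    have hmn : m < (n - 0).toNat := by simpa [PySem.List.length_pyRange_one] using hm1
    by_cases hmi : (m : Int) = i
    · rw [if_pos (by omega), if_pos hmi]
    · rw [if_neg (by omega), if_neg hmi]

lemma pvMain (order_ids : List Int) (itos : List (Int × String)) (teams rounds : Int)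
    (hT : 0 < teams) (hR : 0 < rounds) (k : Nat)
    (hk : (k : Int) ≤ teams * rounds) :
    (List.range k).foldl (fun g (i : Nat) => pvStep order_ids itos teams g (i : Int))
      ((PySem.List.pyRange 0 rounds 1).map (fun _ => (PySem.List.pyRange 0 teams 1).map (fun _ => "")))
    = (PySem.List.pyRange 0 rounds 1).map (fun r =>
        (PySem.List.pyRange 0 teams 1).map (fun c => pvCell order_ids itos teams (k : Int) r c)) := by
  induction k with
  | zero =>
    simp only [List.range_zero, List.foldl_nil, Nat.cast_zero]
    apply List.map_congr_left
    intro r _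
    apply List.map_congr_left
    intro c _
    simp only [pvCell, pvAt]
    split_ifs <;> first | rfl | omega
  | succ k ih =>
    rw [List.range_succ, List.foldl_append, ih (by push_cast at hk ⊢; omega),
        List.foldl_cons, List.foldl_nil]
    simp only [pvStep]
    set rnd := PySem.Int.floordiv (k : Int) teams with hrnddef
    set pos := PySem.Int.mod (k : Int) teams with hposdef
    set col := (if PySem.Int.mod rnd 2 = 0 then pos else teams - 1 - pos) with hcoldef
    have hdiv : rnd * teams + pos = (k : Int) := PySem.Int.floordiv_mul_add_mod _ _
    have hpos0 : 0 ≤ pos ∧ pos < teams := by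
      rw [hposdef, PySem.Int.mod_eq_emod_of_pos hT]
      exact ⟨Int.emod_nonneg _ (by omega), Int.emod_lt_of_pos _ hT⟩
    have hrnd0 : 0 ≤ rnd := by
      rw [hrnddef]
      exact (PySem.Int.le_floordiv_iff_mul_le hT).2 (by simp)
    have hrndR : rnd < rounds := by
      rw [hrnddef]
      refine (PySem.Int.floordiv_lt_iff_lt_mul hT).2 ?_
      have : ((k : Int) + 1) ≤ teams * rounds := by push_cast at hk; omega
      nlinarith
    have hcolT : 0 ≤ col ∧ col < teams := by rw [hcoldef]; split_ifs <;> omega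
    have huniq : ∀ r j : Int, 0 ≤ j → j < teams → r * teams + j = (k : Int) →
        r = rnd ∧ j = pos := by
      intro r j hj1 hj2 hjk
      have h2 : (k : Int) / teams = r ∧ (k : Int) % teams = j :=
        (Int.ediv_emod_unique hT).2 ⟨by rw [← hjk]; ring, hj1, hj2⟩
      rw [hrnddef, hposdef, PySem.Int.floordiv_eq_ediv_of_pos hT,
          PySem.Int.mod_eq_emod_of_pos hT]
      exact ⟨h2.1.symm, h2.2.symm⟩
    rw [PySem.List.pyGetD_map_pyRange_of_nonneg _ rounds rnd _ hrnd0 hrndR]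
    rw [pvSet_map_pyRange _ teams col _ hcolT.1 hcolT.2]
    rw [pvSet_map_pyRange _ rounds rnd _ hrnd0 hrndR]
    apply List.map_congr_left
    intro r hr
    rw [PySem.List.mem_pyRange_one] at hr
    by_cases hrr : r = rnd
    · subst hrr
      rw [if_pos rfl]
      apply List.map_congr_left
      intro c hc
      rw [PySem.List.mem_pyRange_one] at hc
      by_cases hcc : c = col
      · rw [if_pos hcc, hcc]
        simp only [pvCell, pvAt]
        have hj : (if PySem.Int.mod rnd 2 = 0 then col else teams - 1 - col) = pos := by
          rw [hcoldef]; split_ifs <;> omega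
        rw [hj, hdiv, if_pos (by push_cast; omega)]
      · rw [if_neg hcc]
        simp only [pvCell, pvAt]
        generalize hg : (if PySem.Int.mod rnd 2 = 0 then c else teams - 1 - c) = j
        have hjT : 0 ≤ j ∧ j < teams := by rw [← hg]; split_ifs <;> omega
        have hne : rnd * teams + j ≠ (k : Int) := by
          intro hE
          have hjp := (huniq rnd j hjT.1 hjT.2 hE).2
          apply hcc
          rw [hcoldef]
          rw [← hg] at hjp
          split_ifs at hjp ⊢ <;> omega
        split_ifs with h1 h2 h2 <;> first | rfl | (exfalso; push_cast at h1 h2; omega)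
    · rw [if_neg hrr]
      apply List.map_congr_left
      intro c hc
      rw [PySem.List.mem_pyRange_one] at hc
      simp only [pvCell, pvAt]
      generalize hg : (if PySem.Int.mod r 2 = 0 then c else teams - 1 - c) = j
      have hjT : 0 ≤ j ∧ j < teams := by rw [← hg]; split_ifs <;> omega
      have hne : r * teams + j ≠ (k : Int) := by
        intro hE
        exact hrr (huniq r j hjT.1 hjT.2 hE).1
      split_ifs with h1 h2 h2 <;> first | rfl | (exfalso; push_cast at h1 h2; omega)

-- reversing a map over range 0..t-1 reindexes c ↦ t-1-c
lemma pvMap_pyRange_reverse {α : Type} (f : Int → α) (t : Int) :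
    ((PySem.List.pyRange 0 t 1).map f).reverse
      = (PySem.List.pyRange 0 t 1).map (fun c => f (t - 1 - c)) := by
  apply List.ext_getElem
  · simp
  · intro m hm1 hm2
    have hlen : ((PySem.List.pyRange 0 t 1).map f).length = (t - 0).toNat := by
      simp [PySem.List.length_pyRange_one]
    simp only [List.getElem_reverse, List.getElem_map, PySem.List.getElem_pyRange_one, zero_add]
    have hmn : m < (t - 0).toNat := by
      simpa [PySem.List.length_pyRange_one] using hm2
    congr 1
    rw [hlen]
    omega

-- B's padded chunk at base offset, as a per-column formula.
lemma pvChunkPad {α : Type} (names : List α) (pad : α) (t base : Int)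
    (h0 : 0 ≤ base) (ht : 0 < t) :
    (PySem.List.slice names (some base) (some (base + t))
      ++ List.replicate (t - ((PySem.List.slice names (some base) (some (base + t))).length : Int)).toNat pad)
    = (PySem.List.pyRange 0 t 1).map (fun c =>
        if base + c < (names.length : Int) then names.getD (base + c).toNat pad else pad) := by
  rw [PySem.List.slice_toNat names h0 (by omega : (0:Int) ≤ base + t)]
  have hbt : (base + t).toNat - base.toNat = t.toNat := by omega
  rw [hbt]
  have hclen : ((names.drop base.toNat).take t.toNat).length
      = min t.toNat (names.length - base.toNat) := by
    simp
  apply List.ext_getElem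
  · simp only [List.length_append, List.length_replicate, List.length_map,
      PySem.List.length_pyRange_one, hclen]
    omega
  · intro m hm1 hm2
    have hmt : m < t.toNat := by
      simpa [PySem.List.length_pyRange_one] using hm2
    simp only [List.getElem_append, List.getElem_map, PySem.List.getElem_pyRange_one, zero_add]
    by_cases hin : base.toNat + m < names.length
    · have hlt : m < (List.take t.toNat (List.drop base.toNat names)).length := by omega
      rw [dif_pos hlt, if_pos (by push_cast; omega)]
      rw [List.getElem_take, List.getElem_drop]
      rw [List.getD_eq_getElem _ _ (by omega : (base + (m : Int)).toNat < names.length)]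
      congr 1
      omega
    · have hge : ¬ m < (List.take t.toNat (List.drop base.toNat names)).length := by omega
      rw [dif_neg hge, if_neg (by push_cast; omega), List.getElem_replicate]

-- the names list of port B, in the main case, is the mapped prefix of order_ids
lemma pvNames (order_ids : List Int) (itos : List (Int × String)) (m : Int) (hm : 0 ≤ m) :
    (PySem.List.slice order_ids none (some (max 0 m))).map (fun pid =>
      (PySem.Dict.mk itos).getD pid ("<id:" ++ PySem.Int.toStr pid ++ ">"))
    = (order_ids.take (min (order_ids.length : Int) m).toNat).map (fun pid =>
      (PySem.Dict.mk itos).getD pid ("<id:" ++ PySem.Int.toStr pid ++ ">")) := by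
  rw [max_eq_right hm, PySem.List.slice_to _ hm]
  congr 1
  rw [List.take_eq_take_iff]
  omega

-- the per-cell value, read off the mapped prefix of order_ids
lemma pvCellEq (order_ids : List Int) (itos : List (Int × String)) (M idx : Int)
    (h0 : 0 ≤ idx) (hM0 : 0 ≤ M) (hMl : M ≤ (order_ids.length : Int)) :
    pvAt order_ids itos M idx
    = (if idx < (((order_ids.take M.toNat).map (fun pid =>
          (PySem.Dict.mk itos).getD pid ("<id:" ++ PySem.Int.toStr pid ++ ">"))).length : Int)
       then ((order_ids.take M.toNat).map (fun pid =>
          (PySem.Dict.mk itos).getD pid ("<id:" ++ PySem.Int.toStr pid ++ ">"))).getD idx.toNat ""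
       else "") := by
  have hlen : ((order_ids.take M.toNat).map (fun pid =>
      (PySem.Dict.mk itos).getD pid ("<id:" ++ PySem.Int.toStr pid ++ ">"))).length = M.toNat := by
    simp; omega
  rw [hlen]
  simp only [pvAt]
  by_cases h : idx < M
  · rw [if_pos ⟨h0, h⟩, if_pos (by omega)]
    have hidx : idx.toNat < M.toNat := by omega
    rw [List.getD_eq_getElem _ _ (by omega : idx.toNat < ((order_ids.take M.toNat).map (fun pid =>
        (PySem.Dict.mk itos).getD pid ("<id:" ++ PySem.Int.toStr pid ++ ">"))).length)]
    rw [List.getElem_map, List.getElem_take]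
    rw [PySem.List.pyGetD_eq_getElem _ _ h0 (by omega)]
  · rw [if_neg (by omega), if_neg (by omega)]

lemma pvSliceNil {α : Type} (a b : Int) : PySem.List.slice ([] : List α) (some a) (some b) = [] :=
  List.eq_nil_iff_forall_not_mem.2 (fun x hx => by
    simpa using PySem.List.mem_of_mem_slice _ _ _ hx)

-- ===== VERDICT (by name: the statement is the Claim_ definition above) =====
theorem to_grid_spec : Claim_equal_to_grid := by
  intro order_ids itos teams rounds _ hpre
  unfold Spec_to_grid
  simp only [to_grid, to_grid_alt]
  rw [PySem.List.foldl_append_singleton_eq_map, List.nil_append]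
  by_cases hTR : 0 < teams ∧ 0 < rounds
  · obtain ⟨hT, hR⟩ := hTR
    have hm0 : 0 ≤ min ((order_ids.length : Int)) (teams * rounds) :=
      le_min (by positivity) (by positivity)
    rw [pvNames order_ids itos (teams * rounds) (by positivity)]
    rw [PySem.List.pyRange_one 0 (min ((order_ids.length : Int)) (teams * rounds)),
        List.foldl_map]
    simp only [zero_add, sub_zero]
    have key := pvMain order_ids itos teams rounds hT hR
      ((min ((order_ids.length : Int)) (teams * rounds)).toNat)
      (by rw [Int.toNat_of_nonneg hm0]; exact min_le_right _ _)
    rw [Int.toNat_of_nonneg hm0] at key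
    refine Eq.trans key ?_
    set M := min ((order_ids.length : Int)) (teams * rounds) with hMdef
    apply List.map_congr_left
    intro r hr
    rw [PySem.List.mem_pyRange_one] at hr
    have hbase : 0 ≤ r * teams := mul_nonneg hr.1 (le_of_lt hT)
    have hrt : (r + 1) * teams = r * teams + teams := by ring
    rw [hrt, pvChunkPad _ "" teams (r * teams) hbase hT]
    have hML : M ≤ (order_ids.length : Int) := min_le_left _ _
    by_cases hpar : PySem.Int.mod r 2 = 0
    · rw [if_pos hpar]
      apply List.map_congr_left
      intro c hc
      rw [PySem.List.mem_pyRange_one] at hc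
      simp only [pvCell, hpar, if_pos]
      exact pvCellEq order_ids itos M (r * teams + c) (by omega) hm0 hML
    · rw [if_neg hpar, pvMap_pyRange_reverse]
      apply List.map_congr_left
      intro c hc
      rw [PySem.List.mem_pyRange_one] at hc
      simp only [pvCell, if_neg hpar]
      exact pvCellEq order_ids itos M (r * teams + (teams - 1 - c)) (by omega) hm0 hML
  · -- degenerate widths: A's loop is empty and every B row is empty
    have hm : min ((order_ids.length : Int)) (teams * rounds) ≤ 0 := by
      by_cases hneg : teams < 0 ∧ rounds < 0
      · have hids : order_ids = [] := by
          by_contra h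
          exact hpre ⟨hneg.1, hneg.2, h⟩
        refine le_trans (min_le_left _ _) ?_
        simp [hids]
      · have hTR0 : teams * rounds ≤ 0 := by
          rw [not_and_or] at hTR
          rcases hTR with h | h
          · by_cases h2 : 0 ≤ rounds
            · nlinarith
            · have : teams = 0 := by
                by_contra h3
                exact hneg ⟨by omega, by omega⟩
              simp [this]
          · by_cases h2 : 0 ≤ teams
            · nlinarith
            · have : rounds = 0 := by
                by_contra h3
                exact hneg ⟨by omega, by omega⟩
              simp [this]
        exact le_trans (min_le_right _ _) hTR0
    rw [PySem.List.pyRange_one_eq_nil hm, List.foldl_nil]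
    by_cases hR : 0 < rounds
    · have hT : teams ≤ 0 := by
        by_contra hT'
        exact hTR ⟨by omega, hR⟩
      have htr0 : teams * rounds ≤ 0 := mul_nonpos_of_nonpos_of_nonneg hT (by omega)
      have hnames : (PySem.List.slice order_ids none (some (max 0 (teams * rounds)))).map
          (fun pid => (PySem.Dict.mk itos).getD pid ("<id:" ++ PySem.Int.toStr pid ++ ">")) = [] := by
        rw [max_eq_left htr0, PySem.List.slice_to _ le_rfl]
        simp
      rw [hnames]
      apply List.map_congr_left
      intro r hr
      rw [PySem.List.mem_pyRange_one] at hr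
      rw [PySem.List.pyRange_one_eq_nil hT, List.map_nil, pvSliceNil]
      simp only [List.length_nil, Nat.cast_zero, List.nil_append]
      have h0' : (teams - 0 : Int).toNat = 0 := by omega
      rw [h0', List.replicate_zero]
      split_ifs <;> rfl
    · have hRn : rounds ≤ 0 := by omega
      rw [PySem.List.pyRange_one_eq_nil hRn, List.map_nil, List.map_nil]
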